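/- GENERATED by farm/mkstatement.py from design/units.tsv (unit `start_decoder.F4d`) and the assertions of Vorbis/Spec/StartDecoderF4.lean — do not edit.
   THE STATEMENT of the proof unit `start_decoder.F4d`: segment F4d of `start_decoder` (11 instructions; entries 0x1154ee;
   exits 0x115513,0x115499; ranges 0x1154ee-0x11550e + 0x1155be-0x1155c2)
   takes each of its entry assertions to one of its exit assertions (`Vorbis.Spec.StartDecoder.SegF4d`), given the contracts of its callees.
   What the names mean: Vorbis/Spec/Basic.lean (the shared hypotheses), Vorbis/Spec/StartDecoderF4.lean (the assertions). The theorem to prove: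
   `theorem start_decoder_F4d_ok : Vorbis.Spec.start_decoder_F4d.Statement`. -/
import Vorbis.Spec.Reader
import Vorbis.Spec.StartDecoderF4
namespace Vorbis.Spec.start_decoder_F4d
open X86 X86.User Asan

/-- The statement of unit `start_decoder.F4d`. -/
def Statement : Prop :=
  ∀ (Lay : Layout) (_hLay : Lay.hi = 0x1000000) (μ : Microarch) (_hμ : UserX.MicroOK μ) (u₀ : State)
    (_hcode : HasCodeNat Lay u₀ Vorbis.L.start_decoder.entry Vorbis.Code.code_start_decoder.nat Vorbis.L.start_decoder.size)
    (_h_get_bits : ∀ (others : List Obj) (frames : List (Nat × FrameLayout)) (Blk : Block → Prop) (len : Nat), Calls Lay μ Vorbis.WayInv (Vorbis.conv u₀) Vorbis.L.get_bits.entry (Vorbis.Spec.get_bits.spec others frames Blk len)),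
    Vorbis.Spec.StartDecoder.SegF4d Lay μ u₀

end Vorbis.Spec.start_decoder_F4d
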